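-- pv_equiv track=rewrite | github.com/evangoldrick/aoc | 2022/3/part2.py | findCommonChar
-- ===== SOURCE A (Python) =====
-- def findCommonChar(first, second, third):
--     comparisonDict = dict()
--     comparisonDict2 = dict()
--     for character in first:
--         comparisonDict[character] = 1
--
--     for character in second:
--         if character in comparisonDict.keys():
--             comparisonDict2[character] = 1
--
--     for character in third:
--         if character in comparisonDict2.keys():
--             return character
-- ===== SOURCE B (Python) =====
-- def findCommonChar(first, second, third):
--     common = set(first) & set(second) & set(third)
--     if common:
--         return min(common, key=third.find)
-- ===== Notes on version B (the rewrite author's own statement) =====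
-- stated objective: faster
-- what changed: Instead of A's staged dict builds and early-exit scan of third, B computes the full three-way set intersection set(first)&set(second)&set(third) and then selects its member with the smallest first-occurrence index in third (min with key=third.find), which coincides with A's first-match result because that key is injective on the intersection.
import Mathlib
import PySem

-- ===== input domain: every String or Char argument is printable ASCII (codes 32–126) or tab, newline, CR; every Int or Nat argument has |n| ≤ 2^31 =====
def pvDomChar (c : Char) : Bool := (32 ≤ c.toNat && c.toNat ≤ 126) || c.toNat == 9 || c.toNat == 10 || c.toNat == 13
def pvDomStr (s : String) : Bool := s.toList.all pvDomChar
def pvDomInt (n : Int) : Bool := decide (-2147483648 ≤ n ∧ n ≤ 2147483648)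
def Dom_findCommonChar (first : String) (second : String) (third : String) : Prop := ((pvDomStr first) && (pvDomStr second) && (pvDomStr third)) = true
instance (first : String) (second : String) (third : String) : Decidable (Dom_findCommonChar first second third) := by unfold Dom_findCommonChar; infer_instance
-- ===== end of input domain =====

-- B drops A's incremental dict filtering / early-exit scan entirely: it computes the whole
-- three-way set intersection and then takes its argmin under first-occurrence index in `third`.

-- ===== PORT A =====
-- the third loop of A: return the first character of `third` present in comparisonDict2
def pvScanThird (d2 : PySem.Dict Char Int) : List Char → Option String
  | [] => none
  | c :: rest => if d2.contains c then some (String.ofList [c]) else pvScanThird d2 rest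

def findCommonChar (first : String) (second : String) (third : String) : Option String :=
  let comparisonDict := first.toList.foldl (fun d c => d.insert c (1 : Int)) PySem.Dict.empty
  let comparisonDict2 := second.toList.foldl
    (fun d c => if comparisonDict.contains c then d.insert c (1 : Int) else d) PySem.Dict.empty
  pvScanThird comparisonDict2 third.toList

-- ===== PORT B =====
def findCommonChar_alt (first : String) (second : String) (third : String) : Option String :=
  let common : PySem.Set Char :=
    PySem.Set.inter (PySem.Set.inter (PySem.Set.ofList first.toList) (PySem.Set.ofList second.toList))
      (PySem.Set.ofList third.toList)
  if common = [] then none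
  else (PySem.List.min? common (fun c => PySem.Chars.find third.toList [c])).map
    (fun c => String.ofList [c])

-- ===== PRECONDITION & SPEC =====
def Spec_findCommonChar (first : String) (second : String) (third : String) (out : Option String) : Prop := out = findCommonChar_alt first second third
instance (first : String) (second : String) (third : String) (out : Option String) : Decidable (Spec_findCommonChar first second third out) := by unfold Spec_findCommonChar; infer_instance

-- ===== CLAIM (what is proved, stated in full; the proofs are below) =====
def Claim_equal_findCommonChar : Prop := ∀ (first : String) (second : String) (third : String), Dom_findCommonChar first second third → Spec_findCommonChar first second third (findCommonChar first second third)

-- ===== LEMMAS AND PROOFS =====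

-- the first dict's keys are exactly the characters of `first`
lemma fold1_contains (l : List Char) (d : PySem.Dict Char Int) (c : Char) :
    (l.foldl (fun d c => d.insert c (1 : Int)) d).contains c = (l.contains c || d.contains c) := by
  induction l generalizing d with
  | nil => simp
  | cons x xs ih =>
    simp only [List.foldl_cons, ih, PySem.Dict.contains_insert, List.contains_cons]
    by_cases h : c = x
    · simp [h]
    · have hcx : (c == x) = false := beq_eq_false_iff_ne.mpr h
      simp [hcx]

-- the second dict's keys are the characters of `second` that are also keys of d1
lemma fold2_contains (d1 : PySem.Dict Char Int) (l : List Char) (d : PySem.Dict Char Int) (c : Char) :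
    (l.foldl (fun d c => if d1.contains c then d.insert c (1 : Int) else d) d).contains c
      = ((l.contains c && d1.contains c) || d.contains c) := by
  induction l generalizing d with
  | nil => simp
  | cons x xs ih =>
    simp only [List.foldl_cons, List.contains_cons]
    by_cases hx : c = x
    · subst hx
      cases hd : d1.contains c <;>
        simp [ih, hd]
    · have hcx : (c == x) = false := beq_eq_false_iff_ne.mpr hx
      cases hd : d1.contains x <;>
        simp [ih, PySem.Dict.contains_insert, hcx]

-- A's third loop is a find? over `third` under the membership predicate
lemma scan_eq_find? (d2 : PySem.Dict Char Int) (p : Char → Bool)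
    (h : ∀ c, d2.contains c = p c) (l : List Char) :
    pvScanThird d2 l = (l.find? p).map (fun c => String.ofList [c]) := by
  induction l with
  | nil => simp [pvScanThird]
  | cons x xs ih =>
    simp only [pvScanThird, List.find?_cons, h x]
    cases p x <;> simp [ih]


-- a one-element list is a prefix exactly of lists with that head
lemma singleton_prefix_head? (t : List Char) (c : Char) : [c] <+: t ↔ t.head? = some c := by
  cases t <;> simp [List.cons_prefix_cons, eq_comm]

-- idxOf is minimal among indices holding c
lemma idxOf_le_of_getElem? (l : List Char) (c : Char) (k : Nat) (h : l[k]? = some c) :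
    l.idxOf c ≤ k := by
  induction l generalizing k with
  | nil => simp at h
  | cons x xs ih =>
    cases k with
    | zero =>
      simp only [List.getElem?_cons_zero, Option.some.injEq] at h
      simp [List.idxOf_cons_eq _ h]
    | succ k =>
      simp only [List.getElem?_cons_succ] at h
      by_cases hx : x = c
      · simp [List.idxOf_cons_eq _ hx]
      · rw [List.idxOf_cons_ne _ hx]
        exact Nat.succ_le_succ (ih k h)

-- `find l [c]` for c \u2208 l is the index of c's first occurrence
lemma find_singleton (l : List Char) (c : Char) (h : c ∈ l) :
    PySem.Chars.find l [c] = (l.idxOf c : Int) := by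
  have hinf : ([c] : List Char) <:+: l := (List.singleton_infix_iff c l).mpr h
  have h0 : 0 ≤ PySem.Chars.find l [c] := (PySem.Chars.find_nonneg_iff _ _).mpr hinf
  obtain ⟨hpre, hmin⟩ := PySem.Chars.find_spec (s := l) (sub := [c]) h0
  have hk : l[(PySem.Chars.find l [c]).toNat]? = some c := by
    rw [← List.head?_drop]
    exact (singleton_prefix_head? _ _).mp hpre
  have h1 : l.idxOf c ≤ (PySem.Chars.find l [c]).toNat := idxOf_le_of_getElem? l c _ hk
  have h2 : ¬ (l.idxOf c < (PySem.Chars.find l [c]).toNat) := by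
    intro hlt
    apply hmin _ hlt
    rw [singleton_prefix_head?, List.head?_drop]
    rw [List.getElem?_eq_getElem (List.idxOf_lt_length_of_mem h)]
    exact congrArg some (List.getElem_idxOf (List.idxOf_lt_length_of_mem h))
  omega

-- find? returns the satisfier with the least first-occurrence index
lemma find?_idxOf_le (l : List Char) (p : Char → Bool) (m : Char)
    (h : l.find? p = some m) : ∀ y ∈ l, p y → l.idxOf m ≤ l.idxOf y := by
  induction l with
  | nil => simp at h
  | cons x xs ih =>
    intro y hy hpy
    rw [List.find?_cons] at h
    by_cases hpx : p x
    · simp only [hpx] at h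
      rw [Option.some.injEq] at h
      subst h
      simp [List.idxOf_cons_eq _ rfl]
    · simp only [hpx] at h
      have hpm : p m = true := List.find?_some h
      have hxm : x ≠ m := fun e => hpx (e ▸ hpm)
      have hxy : x ≠ y := fun e => hpx (e ▸ hpy)
      rcases List.mem_cons.mp hy with rfl | hy'
      · exact absurd rfl hxy
      · rw [List.idxOf_cons_ne _ hxm, List.idxOf_cons_ne _ hxy]
        exact Nat.succ_le_succ (ih h y hy' hpy)


-- ===== VERDICT (by name: the statement is the Claim_ definition above) =====
theorem findCommonChar_spec : Claim_equal_findCommonChar := by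
  intro first second third _
  show _ = _
  unfold findCommonChar findCommonChar_alt
  rw [scan_eq_find? _ (fun c => first.toList.contains c && second.toList.contains c)
    (by intro c; rw [fold2_contains, fold1_contains]; simp [Bool.and_comm])]
  have hmemC : ∀ c : Char, c ∈ PySem.Set.inter
      (PySem.Set.inter (PySem.Set.ofList first.toList) (PySem.Set.ofList second.toList))
      (PySem.Set.ofList third.toList)
      ↔ c ∈ first.toList ∧ c ∈ second.toList ∧ c ∈ third.toList := by
    intro c
    simp [PySem.Set.mem_inter, PySem.Set.mem_ofList, and_assoc]
  cases hfind : third.toList.find? (fun c => first.toList.contains c && second.toList.contains c) with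
  | none =>
    have hC : PySem.Set.inter
        (PySem.Set.inter (PySem.Set.ofList first.toList) (PySem.Set.ofList second.toList))
        (PySem.Set.ofList third.toList) = [] := by
      rw [List.eq_nil_iff_forall_not_mem]
      intro c hc
      obtain ⟨h1, h2, h3⟩ := (hmemC c).mp hc
      have := List.find?_eq_none.mp hfind c h3
      simp [h1, h2] at this
    simp [hC]
  | some m =>
    have hpm := List.find?_some hfind
    have hmt := List.mem_of_find?_eq_some hfind
    simp only [Bool.and_eq_true, List.contains_iff_mem] at hpm
    have hmC := (hmemC m).mpr ⟨hpm.1, hpm.2, hmt⟩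
    have hne : PySem.Set.inter
        (PySem.Set.inter (PySem.Set.ofList first.toList) (PySem.Set.ofList second.toList))
        (PySem.Set.ofList third.toList) ≠ [] := by
      intro e; rw [e] at hmC; exact absurd hmC (List.not_mem_nil)
    rw [if_neg hne]
    cases hmin : PySem.List.min? (PySem.Set.inter
        (PySem.Set.inter (PySem.Set.ofList first.toList) (PySem.Set.ofList second.toList))
        (PySem.Set.ofList third.toList)) (fun c => PySem.Chars.find third.toList [c]) with
    | none => exact absurd ((PySem.List.min?_eq_none_iff _ _).mp hmin) hne
    | some x =>
      have hxC := PySem.List.min?_mem hmin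
      have hxmin := PySem.List.min?_isMin hmin m hmC
      obtain ⟨hxf, hxs, hxt⟩ := (hmemC x).mp hxC
      rw [find_singleton third.toList x hxt, find_singleton third.toList m hmt] at hxmin
      have hle : third.toList.idxOf m ≤ third.toList.idxOf x :=
        find?_idxOf_le third.toList _ m hfind x hxt (by simp [hxf, hxs])
      have hidx : third.toList.idxOf x = third.toList.idxOf m := by omega
      have hxm : x = m := (List.idxOf_inj (y := m) hxt).mp hidx
      simp [hxm]
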